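-- pv_equiv track=rewrite | github.com/sa02045/1-day-1-algorithm | boj/14502.py | bfs
-- ===== SOURCE A (Python) =====
-- from collections import deque
--
-- def bfs(COPY_MAP):
--     dx=[-1,0,1,0]
--     dy=[0,-1,0,1]
--     visited=[[False for _ in range(len(COPY_MAP[0]))] for _ in range(len(COPY_MAP))]
--     q = deque()
--     for i in range(len(COPY_MAP)):
--         for j in range(len(COPY_MAP[0])):
--             if COPY_MAP[i][j]==2:
--                 q.append([i,j])
--                 visited[i][j] = True
--
--     while q:
--         xy = q.popleft()
--         y = xy[0]
--         x = xy[1]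
--         for i in range(4):
--             nextY = y + dy[i]
--             nextX = x + dx[i]
--
--             if nextX < 0 or nextY <0 or nextY >= len(COPY_MAP) or nextX >=len(COPY_MAP[0]):
--                 continue
--
--             if COPY_MAP[nextY][nextX] == 0 and not visited[nextY][nextX] :
--                 COPY_MAP[nextY][nextX] = 2
--                 q.append([nextY,nextX])
--                 visited[nextY][nextX] = True
--
--     return count_safety(COPY_MAP)
--
-- def count_safety(COPY_MAP):
--     cnt=0
--     for i in range(len(COPY_MAP)):
--         for j in range(len(COPY_MAP[0])):
--             if COPY_MAP[i][j] ==0 :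
--                 cnt +=1
--     return cnt
-- ===== SOURCE B (Python) =====
-- def bfs(COPY_MAP):
--     h = len(COPY_MAP)
--     w = len(COPY_MAP[0])
--     changed = True
--     while changed:
--         changed = False
--         for i in range(h):
--             for j in range(w):
--                 if COPY_MAP[i][j] == 0 and any(
--                     0 <= i + di < h and 0 <= j + dj < w and COPY_MAP[i + di][j + dj] == 2
--                     for di, dj in ((-1, 0), (1, 0), (0, -1), (0, 1))
--                 ):
--                     COPY_MAP[i][j] = 2
--                     changed = True
--     return sum(1 for i in range(h) for j in range(w) if COPY_MAP[i][j] == 0)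
-- ===== Notes on version B (the rewrite author's own statement) =====
-- stated objective: alternative
-- what changed: Replaces the deque-and-visited multi-source BFS with fixed-point relaxation: whole-grid sweeps that turn any 0-cell with a 2-neighbour into 2, repeated until a sweep changes nothing, then the zeros are counted; the visited matrix and the queue disappear.
-- outside the precondition, e.g. on bfs([]): A returns 0, B raises IndexError
import Mathlib
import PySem

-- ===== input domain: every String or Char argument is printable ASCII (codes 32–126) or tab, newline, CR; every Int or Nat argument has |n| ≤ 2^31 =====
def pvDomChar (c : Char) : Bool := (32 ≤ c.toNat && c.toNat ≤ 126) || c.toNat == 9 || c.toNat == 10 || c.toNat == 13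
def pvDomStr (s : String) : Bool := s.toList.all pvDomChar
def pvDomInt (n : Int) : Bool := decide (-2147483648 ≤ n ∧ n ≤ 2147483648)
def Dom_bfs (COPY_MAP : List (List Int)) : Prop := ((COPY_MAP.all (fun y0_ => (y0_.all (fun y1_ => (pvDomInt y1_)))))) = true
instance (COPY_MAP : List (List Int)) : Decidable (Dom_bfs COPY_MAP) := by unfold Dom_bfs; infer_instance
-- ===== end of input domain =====

-- B replaces A's deque-and-visited multi-source BFS by repeated whole-grid relaxation sweeps to a fixed point;
-- both A and B mutate the argument grid in place identically (proved equivalence is about the return value).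

-- shared 2D grid access (Python's g[i][j] read / write; in-bounds under Pre_)
def pvGet2 (g : List (List Int)) (i j : Nat) : Int := (g.getD i []).getD j 0
def pvSet2 (g : List (List Int)) (i j : Nat) (v : Int) : List (List Int) :=
  g.modify i (fun r => r.set j v)

-- ===== PORT A =====
def pvBGet2 (g : List (List Bool)) (i j : Nat) : Bool := (g.getD i []).getD j false
def pvBSet2 (g : List (List Bool)) (i j : Nat) (v : Bool) : List (List Bool) :=
  g.modify i (fun r => r.set j v)

-- the (dy[i], dx[i]) pairs, i = 0..3
def pvDydx : List (Int × Int) := [(0, -1), (-1, 0), (0, 1), (1, 0)]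

-- body of A's inner `for i in range(4)` loop for the popped cell (y, x)
def pvBfsDirs (h w : Nat) (y x : Int)
    (st : List (List Int) × List (List Bool) × List (Int × Int)) (d : Int × Int) :
    List (List Int) × List (List Bool) × List (Int × Int) :=
  let nY := y + d.1
  let nX := x + d.2
  if nX < 0 ∨ nY < 0 ∨ (h : Int) ≤ nY ∨ (w : Int) ≤ nX then st
  else if pvGet2 st.1 nY.toNat nX.toNat = 0 ∧ pvBGet2 st.2.1 nY.toNat nX.toNat = false then
    (pvSet2 st.1 nY.toNat nX.toNat 2, pvBSet2 st.2.1 nY.toNat nX.toNat true,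
      st.2.2 ++ [(nY, nX)])
  else st

-- A's `while q:` loop; fuel h*w + len(q) always suffices (each iteration pops one
-- element and every enqueued cell is freshly marked visited), proved in the lemmas below
def pvBfsLoop (h w : Nat) :
    Nat → List (List Int) → List (List Bool) → List (Int × Int) → List (List Int)
  | 0, g, _, _ => g
  | fuel + 1, g, vis, q =>
    match q with
    | [] => g
    | (y, x) :: rest =>
      let st := pvDydx.foldl (pvBfsDirs h w y x) (g, vis, rest)
      pvBfsLoop h w fuel st.1 st.2.1 st.2.2

def pvCountSafety (g : List (List Int)) : Int :=
  (List.range g.length).foldl (fun cnt i =>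
    (List.range (g.headD []).length).foldl (fun cnt j =>
      if pvGet2 g i j = 0 then cnt + 1 else cnt) cnt) 0

-- A's initial scan building `visited` and `q`
def pvBfsInit (g : List (List Int)) (h w : Nat) :
    List (List Bool) × List (Int × Int) :=
  (List.range h).foldl (fun st i =>
    (List.range w).foldl (fun (st : List (List Bool) × List (Int × Int)) j =>
      if pvGet2 g i j = 2 then (pvBSet2 st.1 i j true, st.2 ++ [((i : Int), (j : Int))])
      else st) st)
    (List.replicate h (List.replicate w false), [])

def bfs (COPY_MAP : List (List Int)) : Int :=
  let h := COPY_MAP.length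
  let w := (COPY_MAP.headD []).length
  let st := pvBfsInit COPY_MAP h w
  pvCountSafety (pvBfsLoop h w (h * w + st.2.length) COPY_MAP st.1 st.2)

-- ===== PORT B =====
def pvDirsB : List (Int × Int) := [(-1, 0), (1, 0), (0, -1), (0, 1)]

-- one generator element of B's `any(...)`: neighbour of (i,j) in direction d is inside and equals 2
def pvNbr2 (h w : Nat) (g : List (List Int)) (i j : Nat) (d : Int × Int) : Bool :=
  let ni := (i : Int) + d.1
  let nj := (j : Int) + d.2
  decide (0 ≤ ni ∧ ni < (h : Int) ∧ 0 ≤ nj ∧ nj < (w : Int)) &&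
    decide (pvGet2 g ni.toNat nj.toNat = 2)

-- one whole-grid sweep of B's while-body; the Bool is B's `changed` flag
def pvSweep (h w : Nat) (g0 : List (List Int)) : List (List Int) × Bool :=
  (List.range h).foldl (fun st i =>
    (List.range w).foldl (fun (st : List (List Int) × Bool) j =>
      if pvGet2 st.1 i j = 0 ∧ pvDirsB.any (pvNbr2 h w st.1 i j) then
        (pvSet2 st.1 i j 2, true)
      else st) st) (g0, false)

-- B's `while changed:` loop; h*w+1 sweeps always suffice (each sweep that reports a
-- change turns at least one 0-cell into 2), proved in the lemmas below
def pvAltLoop (h w : Nat) : Nat → List (List Int) → List (List Int)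
  | 0, g => g
  | fuel + 1, g =>
    let st := pvSweep h w g
    if st.2 then pvAltLoop h w fuel st.1 else st.1

def pvCountB (h w : Nat) (g : List (List Int)) : Int :=
  (List.range h).foldl (fun cnt i =>
    (List.range w).foldl (fun cnt j =>
      if pvGet2 g i j = 0 then cnt + 1 else cnt) cnt) 0

def bfs_alt (COPY_MAP : List (List Int)) : Int :=
  let h := COPY_MAP.length
  let w := (COPY_MAP.headD []).length
  pvCountB h w (pvAltLoop h w (h * w + 1) COPY_MAP)

-- ===== PRECONDITION & SPEC =====
-- Pre_ excludes the inputs on which B raises IndexError evaluating len(COPY_MAP[0]):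
-- grids with a row shorter than row 0 (there A raises too, indexing every row at all
-- columns j < len(COPY_MAP[0])) and the empty grid (there A happens to return 0 because
-- its row loops never run; B naturally raises, so this input stays outside the claim).
def Pre_bfs (COPY_MAP : List (List Int)) : Prop :=
  COPY_MAP ≠ [] ∧ ∀ r ∈ COPY_MAP, (COPY_MAP.headD []).length ≤ r.length
instance (COPY_MAP : List (List Int)) : Decidable (Pre_bfs COPY_MAP) := by
  unfold Pre_bfs; infer_instance

def pvWitness_bfs : List (List Int) := [[2, 0, 1], [0, 0, 0]]

def Spec_bfs (COPY_MAP : List (List Int)) (out : Int) : Prop := out = bfs_alt COPY_MAP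
instance (COPY_MAP : List (List Int)) (out : Int) : Decidable (Spec_bfs COPY_MAP out) := by
  unfold Spec_bfs; infer_instance

-- ===== CLAIM (what is proved, stated in full; the proofs are below) =====
def Claim_equal_bfs : Prop :=
  ∀ (COPY_MAP : List (List Int)), Dom_bfs COPY_MAP → Pre_bfs COPY_MAP →
    Spec_bfs COPY_MAP (bfs COPY_MAP)

-- ===== LEMMAS AND PROOFS =====
-- ---------- abstraction: dimensions, cells, values ----------
def pvH (g0 : List (List Int)) : Nat := g0.length
def pvW (g0 : List (List Int)) : Nat := (g0.headD []).length
def pvVal (g0 : List (List Int)) (c : Nat × Nat) : Int := pvGet2 g0 c.1 c.2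
def pvInb (g0 : List (List Int)) (c : Nat × Nat) : Prop := c.1 < pvH g0 ∧ c.2 < pvW g0
def pvRegion (g0 : List (List Int)) : Finset (Nat × Nat) :=
  Finset.range (pvH g0) ×ˢ Finset.range (pvW g0)
def pvInit (g0 : List (List Int)) : Finset (Nat × Nat) :=
  (pvRegion g0).filter (fun c => pvVal g0 c = 2)
def pvAdj (c n : Nat × Nat) : Prop :=
  (c.1 = n.1 ∧ (c.2 + 1 = n.2 ∨ n.2 + 1 = c.2)) ∨ (c.2 = n.2 ∧ (c.1 + 1 = n.1 ∨ n.1 + 1 = c.1))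
def pvClosed (g0 : List (List Int)) (V : Finset (Nat × Nat)) : Prop :=
  ∀ c n, c ∈ V → pvInb g0 n → pvVal g0 n = 0 → pvAdj c n → n ∈ V
def pvRep (g0 G : List (List Int)) (V : Finset (Nat × Nat)) : Prop :=
  G.length = g0.length ∧ (∀ i, (G.getD i []).length = (g0.getD i []).length) ∧
  ∀ c : Nat × Nat, pvInb g0 c → pvGet2 G c.1 c.2 = (if c ∈ V then 2 else pvVal g0 c)
def pvVisOk (vis : List (List Bool)) (V : Finset (Nat × Nat)) : Prop :=
  ∀ c : Nat × Nat, c ∉ V → pvBGet2 vis c.1 c.2 = false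
def pvCast (c : Nat × Nat) : Int × Int := ((c.1 : Int), (c.2 : Int))

-- ---------- basic 2D get/set lemmas ----------
theorem pvGD2_modify_set {α : Type} (g : List (List α)) (i j a b : Nat) (v d : α) :
    (((g.modify i (fun r => r.set j v)).getD a []).getD b d) =
      if i = a ∧ j = b ∧ i < g.length ∧ j < (g.getD i []).length then v
      else ((g.getD a []).getD b d) := by
  simp only [List.getD_eq_getElem?_getD, List.getElem?_modify]
  by_cases hia : i = a
  · subst hia
    cases hg : g[i]? with
    | none =>
      have hlen : g.length ≤ i := by simpa using List.getElem?_eq_none_iff.mp hg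
      simp only [Option.map_eq_map, Option.map_none, Option.getD_none]
      rw [if_neg (by omega)]
    | some r =>
      have hlen : i < g.length := (List.getElem?_eq_some_iff.mp hg).1
      have hr : g.getD i [] = r := by simp [List.getD_eq_getElem?_getD, hg]
      simp only [Option.map_eq_map, Option.map_some, Option.getD_some, hr, if_true, List.getElem?_set]
      by_cases hjb : j = b
      · subst hjb
        by_cases hjr : j < r.length
        · simp [hjr, hlen]
        · simp [hjr]
      · simp [hjb]
  · rw [if_neg (fun h => hia h.1)]
    simp [hia]
theorem pvGD2_modify_len {α : Type} (g : List (List α)) (i j k : Nat) (v : α) :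
    ((g.modify i (fun r => r.set j v)).getD k []).length = (g.getD k []).length := by
  simp only [List.getD_eq_getElem?_getD, List.getElem?_modify]
  cases hg : g[k]? with
  | none => simp
  | some r => by_cases hik : i = k <;> simp [hik]

-- specializations to the ports' accessors
theorem pvGet2_set2 (g : List (List Int)) (i j a b : Nat) (v : Int) :
    pvGet2 (pvSet2 g i j v) a b =
      if i = a ∧ j = b ∧ i < g.length ∧ j < (g.getD i []).length then v else pvGet2 g a b :=
  pvGD2_modify_set g i j a b v 0

theorem pvBGet2_bset2 (g : List (List Bool)) (i j a b : Nat) (v : Bool) :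
    pvBGet2 (pvBSet2 g i j v) a b =
      if i = a ∧ j = b ∧ i < g.length ∧ j < (g.getD i []).length then v else pvBGet2 g a b :=
  pvGD2_modify_set g i j a b v false

theorem pvSet2_length (g : List (List Int)) (i j : Nat) (v : Int) :
    (pvSet2 g i j v).length = g.length := List.length_modify _ _ _

theorem pvSet2_row_length (g : List (List Int)) (i j k : Nat) (v : Int) :
    ((pvSet2 g i j v).getD k []).length = (g.getD k []).length := pvGD2_modify_len g i j k v

-- rows admitted by Pre_ are at least pvW long
theorem pvRow_len {g0 : List (List Int)} (hp : Pre_bfs g0) {i : Nat} (hi : i < pvH g0) :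
    pvW g0 ≤ (g0.getD i []).length := by
  obtain ⟨-, h⟩ := hp
  have hm : g0.getD i [] ∈ g0 := by
    rw [List.getD_eq_getElem?_getD, List.getElem?_eq_getElem hi]
    exact List.getElem_mem hi
  exact h _ hm

theorem pvMem_region {g0 : List (List Int)} {c : Nat × Nat} :
    c ∈ pvRegion g0 ↔ pvInb g0 c := by
  simp [pvRegion, pvInb, Finset.mem_product]

theorem pvMem_init {g0 : List (List Int)} {c : Nat × Nat} :
    c ∈ pvInit g0 ↔ pvInb g0 c ∧ pvVal g0 c = 2 := by
  simp [pvInit, Finset.mem_filter, pvMem_region]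

theorem pvRep_start (g0 : List (List Int)) : pvRep g0 g0 (pvInit g0) := by
  refine ⟨rfl, fun _ => rfl, fun c hc => ?_⟩
  by_cases h : c ∈ pvInit g0
  · rw [if_pos h]; exact (pvMem_init.mp h).2
  · rw [if_neg h]; rfl

theorem pvRep_insert {g0 G : List (List Int)} {V : Finset (Nat × Nat)} {c : Nat × Nat}
    (hp : Pre_bfs g0) (hR : pvRep g0 G V) (hc : pvInb g0 c) :
    pvRep g0 (pvSet2 G c.1 c.2 2) (insert c V) := by
  obtain ⟨hlen, hrow, hpt⟩ := hR
  refine ⟨(pvSet2_length _ _ _ _).trans hlen, fun i => (pvSet2_row_length _ _ _ _ _).trans (hrow i), ?_⟩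
  intro m hm
  rw [pvGet2_set2]
  by_cases he : c = m
  · subst he
    rw [if_pos ⟨rfl, rfl, by rw [hlen]; exact hc.1, by rw [hrow]; exact lt_of_lt_of_le hc.2 (pvRow_len hp hc.1)⟩]
    rw [if_pos (Finset.mem_insert_self _ _)]
  · have hne : ¬ (c.1 = m.1 ∧ c.2 = m.2 ∧ c.1 < G.length ∧ c.2 < (G.getD c.1 []).length) := by
      intro h; exact he (Prod.ext h.1 h.2.1)
    rw [if_neg hne, hpt m hm]
    by_cases hv : m ∈ V
    · rw [if_pos hv, if_pos (Finset.mem_insert_of_mem hv)]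
    · rw [if_neg hv, if_neg ?_]
      simp only [Finset.mem_insert, hv, or_false]
      exact fun h => he h.symm

theorem pvVisOk_insert {vis : List (List Bool)} {V : Finset (Nat × Nat)} {c : Nat × Nat}
    (h : pvVisOk vis V) : pvVisOk (pvBSet2 vis c.1 c.2 true) (insert c V) := by
  intro m hm
  have hne : m ≠ c := fun he => hm (he ▸ Finset.mem_insert_self _ _)
  rw [pvBGet2_bset2, if_neg (fun hh => hne (Prod.ext hh.1.symm hh.2.1.symm))]
  exact h m (fun hv => hm (Finset.mem_insert_of_mem hv))

theorem pvAdj_symm {c n : Nat × Nat} (h : pvAdj c n) : pvAdj n c := by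
  unfold pvAdj at *
  omega

-- ---------- direction bridges ----------
def pvNbrA (h w : Nat) (y x : Int) (d : Int × Int) : Option (Nat × Nat) :=
  if x + d.2 < 0 ∨ y + d.1 < 0 ∨ (h : Int) ≤ y + d.1 ∨ (w : Int) ≤ x + d.2 then none
  else some ((y + d.1).toNat, (x + d.2).toNat)

theorem pvNbrA_lt {h w : Nat} {y x : Int} {d : Int × Int} {n : Nat × Nat}
    (heq : pvNbrA h w y x d = some n) : n.1 < h ∧ n.2 < w := by
  unfold pvNbrA at heq
  split at heq
  · simp at heq
  · rename_i hcond
    obtain rfl : ((y + d.1).toNat, (x + d.2).toNat) = n := Option.some.inj heq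
    push Not at hcond
    constructor <;> simp <;> omega

theorem pvNbrA_adj {g0 : List (List Int)} {d : Int × Int} {c n : Nat × Nat}
    (hd : d ∈ pvDydx) (heq : pvNbrA (pvH g0) (pvW g0) (c.1 : Int) (c.2 : Int) d = some n) :
    pvInb g0 n ∧ pvAdj c n := by
  have hlt := pvNbrA_lt heq
  refine ⟨hlt, ?_⟩
  unfold pvNbrA at heq
  split at heq
  · simp at heq
  · rename_i hcond
    push Not at hcond
    obtain rfl : ((c.1 + d.1).toNat, ((c.2 : Int) + d.2).toNat) = n := Option.some.inj heq
    fin_cases hd <;> (unfold pvAdj; simp only [] <;> omega)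

theorem pvAdj_dir {g0 : List (List Int)} {c n : Nat × Nat}
    (hn : pvInb g0 n) (ha : pvAdj c n) :
    ∃ d ∈ pvDydx, pvNbrA (pvH g0) (pvW g0) (c.1 : Int) (c.2 : Int) d = some n := by
  obtain ⟨hn1, hn2⟩ := hn
  unfold pvAdj at ha
  rcases ha with ⟨h1, h2 | h2⟩ | ⟨h1, h2 | h2⟩
  · exact ⟨(0, 1), by simp [pvDydx], by unfold pvNbrA; rw [if_neg (by omega)]; congr 1; apply Prod.ext <;> simp <;> omega⟩
  · exact ⟨(0, -1), by simp [pvDydx], by unfold pvNbrA; rw [if_neg (by omega)]; congr 1; apply Prod.ext <;> simp <;> omega⟩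
  · exact ⟨(1, 0), by simp [pvDydx], by unfold pvNbrA; rw [if_neg (by omega)]; congr 1; apply Prod.ext <;> simp <;> omega⟩
  · exact ⟨(-1, 0), by simp [pvDydx], by unfold pvNbrA; rw [if_neg (by omega)]; congr 1; apply Prod.ext <;> simp <;> omega⟩

-- abstract mirror of pvNbr2 with the grid test replaced by membership
def pvNbrV (h w : Nat) (V : Finset (Nat × Nat)) (c : Nat × Nat) (d : Int × Int) : Bool :=
  decide (0 ≤ (c.1 : Int) + d.1 ∧ (c.1 : Int) + d.1 < (h : Int) ∧
          0 ≤ (c.2 : Int) + d.2 ∧ (c.2 : Int) + d.2 < (w : Int)) &&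
  decide ((((c.1 : Int) + d.1).toNat, ((c.2 : Int) + d.2).toNat) ∈ V)

theorem pvNbrV_adj {g0 : List (List Int)} {V : Finset (Nat × Nat)} {c : Nat × Nat} {d : Int × Int}
    (hd : d ∈ pvDirsB) (ht : pvNbrV (pvH g0) (pvW g0) V c d = true) :
    ∃ n ∈ V, pvInb g0 n ∧ pvAdj c n := by
  unfold pvNbrV at ht
  rw [Bool.and_eq_true, decide_eq_true_iff, decide_eq_true_iff] at ht
  obtain ⟨hb, hm⟩ := ht
  refine ⟨_, hm, ?_, ?_⟩
  · constructor <;> simp <;> omega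
  · fin_cases hd <;> (unfold pvAdj; simp only [] <;> omega)

theorem pvAdj_dirB {g0 : List (List Int)} {V : Finset (Nat × Nat)} {c n : Nat × Nat}
    (hn : pvInb g0 n) (hm : n ∈ V) (ha : pvAdj c n) :
    pvDirsB.any (pvNbrV (pvH g0) (pvW g0) V c) = true := by
  rw [List.any_eq_true]
  obtain ⟨hn1, hn2⟩ := hn
  unfold pvAdj at ha
  have key : ∀ d : Int × Int, d ∈ pvDirsB →
      ((c.1 : Int) + d.1).toNat = n.1 → ((c.2 : Int) + d.2).toNat = n.2 →
      0 ≤ (c.1 : Int) + d.1 → 0 ≤ (c.2 : Int) + d.2 →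
      pvNbrV (pvH g0) (pvW g0) V c d = true := by
    intro d hd h1 h2 h3 h4
    unfold pvNbrV
    rw [Bool.and_eq_true, decide_eq_true_iff, decide_eq_true_iff]
    refine ⟨⟨h3, by omega, h4, by omega⟩, ?_⟩
    rw [show (((c.1 : Int) + d.1).toNat, ((c.2 : Int) + d.2).toNat) = n from Prod.ext h1 h2]
    exact hm
  rcases ha with ⟨h1, h2 | h2⟩ | ⟨h1, h2 | h2⟩
  · exact ⟨(0, 1), by simp [pvDirsB], key _ (by simp [pvDirsB]) (by omega) (by omega) (by omega) (by omega)⟩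
  · exact ⟨(0, -1), by simp [pvDirsB], key _ (by simp [pvDirsB]) (by omega) (by omega) (by omega) (by omega)⟩
  · exact ⟨(1, 0), by simp [pvDirsB], key _ (by simp [pvDirsB]) (by omega) (by omega) (by omega) (by omega)⟩
  · exact ⟨(-1, 0), by simp [pvDirsB], key _ (by simp [pvDirsB]) (by omega) (by omega) (by omega) (by omega)⟩

-- ---------- abstract mirror of A's BFS ----------
def pvStepA (g0 : List (List Int)) (h w : Nat) (y x : Int)
    (st : Finset (Nat × Nat) × List (Nat × Nat)) (d : Int × Int) :
    Finset (Nat × Nat) × List (Nat × Nat) :=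
  match pvNbrA h w y x d with
  | none => st
  | some n => if pvVal g0 n = 0 ∧ n ∉ st.1 then (insert n st.1, st.2 ++ [n]) else st

def pvLoopA (g0 : List (List Int)) (h w : Nat) :
    Nat → Finset (Nat × Nat) → List (Nat × Nat) → Finset (Nat × Nat)
  | 0, V, _ => V
  | fuel + 1, V, Q =>
    match Q with
    | [] => V
    | c :: rest =>
      let st := pvDydx.foldl (pvStepA g0 h w (c.1 : Int) (c.2 : Int)) (V, rest)
      pvLoopA g0 h w fuel st.1 st.2

theorem pvDirs_sim (g0 : List (List Int)) (hp : Pre_bfs g0) :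
    ∀ (ds : List (Int × Int)) (G : List (List Int)) (vis : List (List Bool))
      (V : Finset (Nat × Nat)) (Q : List (Nat × Nat)) (y x : Int),
      pvRep g0 G V → pvVisOk vis V →
      pvRep g0 (ds.foldl (pvBfsDirs (pvH g0) (pvW g0) y x) (G, vis, Q.map pvCast)).1
        (ds.foldl (pvStepA g0 (pvH g0) (pvW g0) y x) (V, Q)).1 ∧
      pvVisOk (ds.foldl (pvBfsDirs (pvH g0) (pvW g0) y x) (G, vis, Q.map pvCast)).2.1
        (ds.foldl (pvStepA g0 (pvH g0) (pvW g0) y x) (V, Q)).1 ∧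
      (ds.foldl (pvBfsDirs (pvH g0) (pvW g0) y x) (G, vis, Q.map pvCast)).2.2 =
        (ds.foldl (pvStepA g0 (pvH g0) (pvW g0) y x) (V, Q)).2.map pvCast := by
  intro ds
  induction ds with
  | nil => exact fun G vis V Q y x hR hV => ⟨hR, hV, rfl⟩
  | cons d ds ih =>
    intro G vis V Q y x hR hV
    simp only [List.foldl_cons]
    by_cases hg : x + d.2 < 0 ∨ y + d.1 < 0 ∨ ((pvH g0 : Int) ≤ y + d.1) ∨ ((pvW g0 : Int) ≤ x + d.2)
    · rw [show pvBfsDirs (pvH g0) (pvW g0) y x (G, vis, Q.map pvCast) d = (G, vis, Q.map pvCast) by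
        unfold pvBfsDirs; rw [if_pos hg]]
      rw [show pvStepA g0 (pvH g0) (pvW g0) y x (V, Q) d = (V, Q) by
        unfold pvStepA pvNbrA; rw [if_pos hg]]
      exact ih G vis V Q y x hR hV
    · have hnb : pvNbrA (pvH g0) (pvW g0) y x d = some ((y + d.1).toNat, (x + d.2).toNat) := by
        unfold pvNbrA; rw [if_neg hg]
      set n : Nat × Nat := ((y + d.1).toNat, (x + d.2).toNat) with hn
      have hinb : pvInb g0 n := by
        unfold pvInb
        push Not at hg
        rw [hn]
        dsimp only
        constructor <;> omega
      have hcond : (pvGet2 G n.1 n.2 = 0 ∧ pvBGet2 vis n.1 n.2 = false) ↔ (pvVal g0 n = 0 ∧ n ∉ V) := by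
        by_cases hv : n ∈ V
        · have : pvGet2 G n.1 n.2 = 2 := by rw [(hR.2.2) n hinb, if_pos hv]
          constructor
          · intro hh; rw [this] at hh; exact absurd hh.1 (by norm_num)
          · intro hh; exact absurd hv hh.2
        · have hgv : pvGet2 G n.1 n.2 = pvVal g0 n := by rw [(hR.2.2) n hinb, if_neg hv]
          constructor
          · intro hh; exact ⟨hgv ▸ hh.1, hv⟩
          · intro hh; exact ⟨hgv.trans hh.1 |>.symm ▸ rfl, hV n hv⟩
      by_cases hc : pvVal g0 n = 0 ∧ n ∉ V
      · have hc' : pvGet2 G n.1 n.2 = 0 ∧ pvBGet2 vis n.1 n.2 = false := hcond.mpr hc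
        rw [show pvBfsDirs (pvH g0) (pvW g0) y x (G, vis, Q.map pvCast) d =
            (pvSet2 G n.1 n.2 2, pvBSet2 vis n.1 n.2 true, Q.map pvCast ++ [(y + d.1, x + d.2)]) by
          unfold pvBfsDirs; rw [if_neg hg, if_pos hc']]
        rw [show pvStepA g0 (pvH g0) (pvW g0) y x (V, Q) d = (insert n V, Q ++ [n]) by
          unfold pvStepA; rw [hnb]; exact if_pos hc]
        have hcast : pvCast n = ((y + d.1 : Int), (x + d.2 : Int)) := by
          rw [hn]
          unfold pvCast
          dsimp only
          push Not at hg
          apply Prod.ext <;> dsimp only <;> omega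
        have hq : Q.map pvCast ++ [(y + d.1, x + d.2)] = (Q ++ [n]).map pvCast := by
          rw [List.map_append]
          simp [hcast]
        rw [hq]
        exact ih _ _ _ _ y x (pvRep_insert hp hR hinb) (pvVisOk_insert hV)
      · have hc' : ¬ (pvGet2 G n.1 n.2 = 0 ∧ pvBGet2 vis n.1 n.2 = false) := fun hh => hc (hcond.mp hh)
        rw [show pvBfsDirs (pvH g0) (pvW g0) y x (G, vis, Q.map pvCast) d = (G, vis, Q.map pvCast) by
          unfold pvBfsDirs; rw [if_neg hg, if_neg hc']]
        rw [show pvStepA g0 (pvH g0) (pvW g0) y x (V, Q) d = (V, Q) by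
          unfold pvStepA; rw [hnb]; exact if_neg hc]
        exact ih G vis V Q y x hR hV

theorem pvStepA_cases (g0 : List (List Int)) (h w : Nat) (y x : Int)
    (st : Finset (Nat × Nat) × List (Nat × Nat)) (d : Int × Int) :
    pvStepA g0 h w y x st d = st ∨
    ∃ n, pvNbrA h w y x d = some n ∧ pvVal g0 n = 0 ∧ n ∉ st.1 ∧
      pvStepA g0 h w y x st d = (insert n st.1, st.2 ++ [n]) := by
  unfold pvStepA
  cases hnb : pvNbrA h w y x d with
  | none => exact Or.inl rfl
  | some n =>
    by_cases hc : pvVal g0 n = 0 ∧ n ∉ st.1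
    · exact Or.inr ⟨n, rfl, hc.1, hc.2, if_pos hc⟩
    · exact Or.inl (if_neg hc)

theorem pvFoldA_props (g0 : List (List Int)) (h w : Nat) (y x : Int) :
    ∀ (ds : List (Int × Int)) (st : Finset (Nat × Nat) × List (Nat × Nat)),
      st.1 ⊆ (ds.foldl (pvStepA g0 h w y x) st).1 ∧
      (∀ m ∈ st.2, m ∈ (ds.foldl (pvStepA g0 h w y x) st).2) ∧
      (ds.foldl (pvStepA g0 h w y x) st).1.card + st.2.length =
        st.1.card + (ds.foldl (pvStepA g0 h w y x) st).2.length ∧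
      (∀ m ∈ (ds.foldl (pvStepA g0 h w y x) st).1,
        m ∈ st.1 ∨ (m.1 < h ∧ m.2 < w ∧ pvVal g0 m = 0 ∧ m ∈ (ds.foldl (pvStepA g0 h w y x) st).2)) ∧
      (∀ m ∈ (ds.foldl (pvStepA g0 h w y x) st).2, m ∈ st.2 ∨ m ∈ (ds.foldl (pvStepA g0 h w y x) st).1) := by
  intro ds
  induction ds with
  | nil => exact fun st => ⟨fun _ h => h, fun m hm => hm, rfl, fun m hm => Or.inl hm, fun m hm => Or.inl hm⟩
  | cons d ds ih =>
    intro st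
    simp only [List.foldl_cons]
    rcases pvStepA_cases g0 h w y x st d with heq | ⟨n, hnb, hval, hnotin, heq⟩
    · rw [heq]; exact ih st
    · rw [heq]
      obtain ⟨ia, ib, ic, id', ie⟩ := ih (insert n st.1, st.2 ++ [n])
      refine ⟨fun m hm => ia (Finset.mem_insert_of_mem hm), ?_, ?_, ?_, ?_⟩
      · exact fun m hm => ib m (List.mem_append_left _ hm)
      · have hcard : (insert n st.1).card = st.1.card + 1 := Finset.card_insert_of_notMem hnotin
        have hlen : (st.2 ++ [n]).length = st.2.length + 1 := by simp
        rw [hcard, hlen] at ic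
        omega
      · intro m hm
        rcases id' m hm with hm' | hm'
        · rcases Finset.mem_insert.mp hm' with rfl | hm''
          · have hb := pvNbrA_lt hnb
            exact Or.inr ⟨hb.1, hb.2, hval, ib m (List.mem_append_right _ (List.mem_singleton.mpr rfl))⟩
          · exact Or.inl hm''
        · exact Or.inr hm'
      · intro m hm
        rcases ie m hm with hm' | hm'
        · rcases List.mem_append.mp hm' with hm'' | hm''
          · exact Or.inl hm''
          · rcases List.mem_singleton.mp hm'' with rfl
            exact Or.inr (ia (Finset.mem_insert_self _ _))
        · exact Or.inr hm'

theorem pvFoldA_min (g0 : List (List Int)) :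
    ∀ (ds : List (Int × Int)), (∀ d ∈ ds, d ∈ pvDydx) →
    ∀ (st : Finset (Nat × Nat) × List (Nat × Nat)) (c : Nat × Nat) (W : Finset (Nat × Nat)),
      pvClosed g0 W → c ∈ W → st.1 ⊆ W →
      (ds.foldl (pvStepA g0 (pvH g0) (pvW g0) (c.1 : Int) (c.2 : Int)) st).1 ⊆ W := by
  intro ds
  induction ds with
  | nil => exact fun _ st c W _ _ hsub => hsub
  | cons d ds ih =>
    intro hds st c W hW hc hsub
    simp only [List.foldl_cons]
    rcases pvStepA_cases g0 (pvH g0) (pvW g0) (c.1 : Int) (c.2 : Int) st d with heq | ⟨n, hnb, hval, _, heq⟩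
    · rw [heq]; exact ih (fun d hd => hds d (List.mem_cons_of_mem _ hd)) st c W hW hc hsub
    · rw [heq]
      have ⟨hinb, hadj⟩ := pvNbrA_adj (hds d (List.mem_cons_self)) hnb
      have hnW : n ∈ W := hW c n hc hinb hval hadj
      exact ih (fun d hd => hds d (List.mem_cons_of_mem _ hd)) _ c W hW hc
        (Finset.insert_subset hnW hsub)

theorem pvFoldA_proc (g0 : List (List Int)) (y x : Int) :
    ∀ (ds : List (Int × Int)) (st : Finset (Nat × Nat) × List (Nat × Nat)),
      ∀ d ∈ ds, ∀ n, pvNbrA (pvH g0) (pvW g0) y x d = some n → pvVal g0 n = 0 →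
      n ∈ (ds.foldl (pvStepA g0 (pvH g0) (pvW g0) y x) st).1 := by
  intro ds
  induction ds with
  | nil => exact fun st d hd => absurd hd (List.not_mem_nil)
  | cons d0 ds ih =>
    intro st d hd n hnb hval
    simp only [List.foldl_cons]
    rcases List.mem_cons.mp hd with rfl | hd'
    · rcases pvStepA_cases g0 (pvH g0) (pvW g0) y x st d with heq | ⟨n', hnb', hval', hnotin', heq⟩
      · have hn : n ∈ st.1 := by
          by_contra hcon
          have heq2 : pvStepA g0 (pvH g0) (pvW g0) y x st d = (insert n st.1, st.2 ++ [n]) := by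
            unfold pvStepA
            rw [hnb]
            exact if_pos ⟨hval, hcon⟩
          have : insert n st.1 = st.1 := congrArg Prod.fst (heq2.symm.trans heq)
          exact hcon (this ▸ Finset.mem_insert_self n st.1)
        rw [heq]
        exact (pvFoldA_props g0 (pvH g0) (pvW g0) y x ds st).1 hn
      · rw [hnb] at hnb'
        obtain rfl := Option.some.inj hnb'
        rw [heq]
        exact (pvFoldA_props g0 (pvH g0) (pvW g0) y x ds _).1 (Finset.mem_insert_self _ _)
    · rcases pvStepA_cases g0 (pvH g0) (pvW g0) y x st d0 with heq | ⟨n', hnb', hval', hnotin', heq⟩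
      · rw [heq]; exact ih st d hd' n hnb hval
      · rw [heq]; exact ih _ d hd' n hnb hval

theorem pvCard_le (g0 : List (List Int)) {V : Finset (Nat × Nat)}
    (hreg : ∀ m ∈ V, pvInb g0 m) : V.card ≤ pvH g0 * pvW g0 := by
  have hsub : V ⊆ pvRegion g0 := fun m hm => pvMem_region.mpr (hreg m hm)
  calc V.card ≤ (pvRegion g0).card := Finset.card_le_card hsub
    _ = pvH g0 * pvW g0 := by rw [pvRegion, Finset.card_product]; simp

theorem pvLoop_sim (g0 : List (List Int)) (hp : Pre_bfs g0) :
    ∀ (fuel : Nat) (G : List (List Int)) (vis : List (List Bool))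
      (V : Finset (Nat × Nat)) (Q : List (Nat × Nat)),
      pvRep g0 G V → pvVisOk vis V →
      pvRep g0 (pvBfsLoop (pvH g0) (pvW g0) fuel G vis (Q.map pvCast))
        (pvLoopA g0 (pvH g0) (pvW g0) fuel V Q) := by
  intro fuel
  induction fuel with
  | zero => intro G vis V Q hR hV; exact hR
  | succ fuel ih =>
    intro G vis V Q hR hV
    cases Q with
    | nil => exact hR
    | cons c rest =>
      show pvRep g0 (pvBfsLoop (pvH g0) (pvW g0) (fuel + 1) G vis ((c.1, c.2) :: rest.map pvCast)) _
      rw [pvBfsLoop, pvLoopA]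
      obtain ⟨h1, h2, h3⟩ := pvDirs_sim g0 hp pvDydx G vis V rest (c.1 : Int) (c.2 : Int) hR hV
      rw [h3]
      exact ih _ _ _ _ h1 h2

theorem pvLoopA_main (g0 : List (List Int)) (hp : Pre_bfs g0) :
    ∀ (fuel : Nat) (V : Finset (Nat × Nat)) (Q : List (Nat × Nat)),
      (∀ m ∈ Q, m ∈ V) → (∀ m ∈ V, pvInb g0 m) →
      (Q.length + pvH g0 * pvW g0 ≤ fuel + V.card) →
      (∀ c ∈ V, c ∉ Q → ∀ d ∈ pvDydx, ∀ n,
        pvNbrA (pvH g0) (pvW g0) (c.1 : Int) (c.2 : Int) d = some n → pvVal g0 n = 0 → n ∈ V) →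
      V ⊆ pvLoopA g0 (pvH g0) (pvW g0) fuel V Q ∧
      (∀ m ∈ pvLoopA g0 (pvH g0) (pvW g0) fuel V Q, pvInb g0 m) ∧
      pvClosed g0 (pvLoopA g0 (pvH g0) (pvW g0) fuel V Q) ∧
      (∀ W, pvClosed g0 W → V ⊆ W → pvLoopA g0 (pvH g0) (pvW g0) fuel V Q ⊆ W) := by
  intro fuel
  induction fuel with
  | zero =>
    intro V Q hQV hreg hfuel hproc
    have hQ : Q = [] := by
      have := pvCard_le g0 hreg
      have : Q.length = 0 := by omega
      exact List.length_eq_zero_iff.mp this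
    subst hQ
    refine ⟨fun _ h => h, hreg, ?_, fun W _ hsub => hsub⟩
    intro a n ha hn hv hadj
    obtain ⟨d, hd, hnb⟩ := pvAdj_dir hn hadj
    exact hproc a ha (List.not_mem_nil) d hd n hnb hv
  | succ fuel ih =>
    intro V Q hQV hreg hfuel hproc
    cases Q with
    | nil =>
      refine ⟨fun _ h => h, hreg, ?_, fun W _ hsub => hsub⟩
      intro a n ha hn hv hadj
      obtain ⟨d, hd, hnb⟩ := pvAdj_dir hn hadj
      exact hproc a ha (List.not_mem_nil) d hd n hnb hv
    | cons c rest =>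
      rw [pvLoopA]
      obtain ⟨pa, pb, pc, pd, pe⟩ :=
        pvFoldA_props g0 (pvH g0) (pvW g0) (c.1 : Int) (c.2 : Int) pvDydx (V, rest)
      set st := pvDydx.foldl (pvStepA g0 (pvH g0) (pvW g0) (c.1 : Int) (c.2 : Int)) (V, rest) with hst
      have hQV' : ∀ m ∈ st.2, m ∈ st.1 := by
        intro m hm
        rcases pe m hm with hm' | hm'
        · exact pa (hQV m (List.mem_cons_of_mem _ hm'))
        · exact hm'
      have hreg' : ∀ m ∈ st.1, pvInb g0 m := by
        intro m hm
        rcases pd m hm with hm' | hm'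
        · exact hreg m hm'
        · exact ⟨hm'.1, hm'.2.1⟩
      have hfuel' : st.2.length + pvH g0 * pvW g0 ≤ fuel + st.1.card := by
        have pc' := pc
        dsimp only at pc'
        simp only [List.length_cons] at hfuel
        omega
      have hproc' : ∀ c' ∈ st.1, c' ∉ st.2 → ∀ d ∈ pvDydx, ∀ n,
          pvNbrA (pvH g0) (pvW g0) (c'.1 : Int) (c'.2 : Int) d = some n → pvVal g0 n = 0 → n ∈ st.1 := by
        intro c' hc' hnq d hd n hnb hval
        rcases pd c' hc' with hm' | hm'
        · by_cases hcc : c' = c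
          · subst hcc
            exact pvFoldA_proc g0 (c'.1 : Int) (c'.2 : Int) pvDydx (V, rest) d hd n hnb hval
          · have hrest : c' ∉ rest := fun hr => hnq (pb c' hr)
            have : c' ∉ (c :: rest) := by
              intro hmem
              rcases List.mem_cons.mp hmem with h | h
              · exact hcc h
              · exact hrest h
            exact pa (hproc c' hm' this d hd n hnb hval)
        · exact absurd hm'.2.2.2 hnq
      obtain ⟨qa, qb, qc, qd⟩ := ih st.1 st.2 hQV' hreg' hfuel' hproc'
      refine ⟨fun m hm => qa (pa hm), qb, qc, ?_⟩
      intro W hW hsub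
      have hcW : c ∈ W := hsub (hQV c (List.mem_cons_self))
      have hstW : st.1 ⊆ W :=
        pvFoldA_min g0 pvDydx (fun _ h => h) (V, rest) c W hW hcW hsub
      exact qd W hW hstW

-- ---------- A's initial scan ----------
def pvCells (h w : Nat) : List (Nat × Nat) :=
  (List.range h).flatMap (fun i => (List.range w).map (fun j => (i, j)))

theorem pvMem_cells {h w : Nat} {c : Nat × Nat} :
    c ∈ pvCells h w ↔ c.1 < h ∧ c.2 < w := by
  cases c with
  | mk a b =>
    simp only [pvCells, List.mem_flatMap, List.mem_map, List.mem_range]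
    constructor
    · rintro ⟨i, hi, j, hj, heq⟩
      obtain ⟨rfl, rfl⟩ := Prod.mk.injEq .. ▸ heq
      exact ⟨hi, hj⟩
    · rintro ⟨ha, hb⟩
      exact ⟨a, ha, b, hb, rfl⟩

def pvInitStep (g0 : List (List Int)) (st : List (List Bool) × List (Int × Int))
    (c : Nat × Nat) : List (List Bool) × List (Int × Int) :=
  if pvGet2 g0 c.1 c.2 = 2 then (pvBSet2 st.1 c.1 c.2 true, st.2 ++ [pvCast c]) else st

theorem pvBfsInit_eq (g0 : List (List Int)) (h w : Nat) :
    pvBfsInit g0 h w =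
      (pvCells h w).foldl (pvInitStep g0)
        (List.replicate h (List.replicate w false), []) := by
  unfold pvBfsInit pvCells pvInitStep pvCast
  rw [List.foldl_flatMap]
  simp only [List.foldl_map]

theorem pvInitFold_queue (g0 : List (List Int)) :
    ∀ (cells : List (Nat × Nat)) (st : List (List Bool) × List (Int × Int)),
      (cells.foldl (pvInitStep g0) st).2 =
        st.2 ++ (cells.filter (fun c => pvVal g0 c = 2)).map pvCast := by
  intro cells
  induction cells with
  | nil => intro st; simp
  | cons c cells ih =>
    intro st
    simp only [List.foldl_cons, List.filter_cons]
    by_cases hc : pvVal g0 c = 2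
    · rw [if_pos (by simpa using hc)]
      rw [show pvInitStep g0 st c = (pvBSet2 st.1 c.1 c.2 true, st.2 ++ [pvCast c]) from
        if_pos hc]
      rw [ih]
      simp
    · rw [if_neg (by simpa using hc)]
      rw [show pvInitStep g0 st c = st from if_neg hc]
      exact ih st

theorem pvInitFold_vis (g0 : List (List Int)) :
    ∀ (cells : List (Nat × Nat)) (st : List (List Bool) × List (Int × Int)),
      (∀ c ∈ cells, pvInb g0 c) → pvVisOk st.1 (pvInit g0) →
      pvVisOk (cells.foldl (pvInitStep g0) st).1 (pvInit g0) := by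
  intro cells
  induction cells with
  | nil => exact fun st _ hv => hv
  | cons c cells ih =>
    intro st hcells hv
    simp only [List.foldl_cons]
    refine ih _ (fun c' hc' => hcells c' (List.mem_cons_of_mem _ hc')) ?_
    by_cases hc : pvVal g0 c = 2
    · rw [show pvInitStep g0 st c = (pvBSet2 st.1 c.1 c.2 true, st.2 ++ [pvCast c]) from
        if_pos hc]
      have hcI : c ∈ pvInit g0 := pvMem_init.mpr ⟨hcells c (List.mem_cons_self), hc⟩
      intro m hm
      have hne : m ≠ c := fun he => hm (he ▸ hcI)
      show pvBGet2 (pvBSet2 st.1 c.1 c.2 true) m.1 m.2 = false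
      rw [pvBGet2_bset2, if_neg (fun hh => hne (Prod.ext hh.1.symm hh.2.1.symm))]
      exact hv m hm
    · rw [show pvInitStep g0 st c = st from if_neg hc]
      exact hv
  
theorem pvBGet2_replicate (h w a b : Nat) :
    pvBGet2 (List.replicate h (List.replicate w false)) a b = false := by
  unfold pvBGet2
  simp only [List.getD_eq_getElem?_getD, List.getElem?_replicate]
  split_ifs <;> simp [List.getD_eq_getElem?_getD, List.getElem?_replicate]
  split_ifs <;> simp

-- ---------- abstract mirror of B's sweeps ----------
def pvSweepStep (h w : Nat) (st : List (List Int) × Bool) (c : Nat × Nat) :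
    List (List Int) × Bool :=
  if pvGet2 st.1 c.1 c.2 = 0 ∧ pvDirsB.any (pvNbr2 h w st.1 c.1 c.2) then
    (pvSet2 st.1 c.1 c.2 2, true)
  else st

theorem pvSweep_eq (h w : Nat) (g : List (List Int)) :
    pvSweep h w g = (pvCells h w).foldl (pvSweepStep h w) (g, false) := by
  unfold pvSweep pvCells pvSweepStep
  rw [List.foldl_flatMap]
  simp only [List.foldl_map]

def pvStepB (g0 : List (List Int)) (h w : Nat) (st : Finset (Nat × Nat) × Bool)
    (c : Nat × Nat) : Finset (Nat × Nat) × Bool :=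
  if (c ∉ st.1 ∧ pvVal g0 c = 0) ∧ pvDirsB.any (pvNbrV h w st.1 c) then
    (insert c st.1, true)
  else st

theorem pvSweep_sim (g0 : List (List Int)) (hp : Pre_bfs g0) :
    ∀ (cells : List (Nat × Nat)) (G : List (List Int)) (V : Finset (Nat × Nat)) (b : Bool),
      (∀ c ∈ cells, pvInb g0 c) → pvRep g0 G V → pvInit g0 ⊆ V →
      pvRep g0 (cells.foldl (pvSweepStep (pvH g0) (pvW g0)) (G, b)).1
        (cells.foldl (pvStepB g0 (pvH g0) (pvW g0)) (V, b)).1 ∧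
      (cells.foldl (pvSweepStep (pvH g0) (pvW g0)) (G, b)).2 =
        (cells.foldl (pvStepB g0 (pvH g0) (pvW g0)) (V, b)).2 ∧
      pvInit g0 ⊆ (cells.foldl (pvStepB g0 (pvH g0) (pvW g0)) (V, b)).1 := by
  intro cells
  induction cells with
  | nil => exact fun G V b _ hR hI => ⟨hR, rfl, hI⟩
  | cons c cells ih =>
    intro G V b hcells hR hI
    have hinb : pvInb g0 c := hcells c (List.mem_cons_self)
    have hcells' : ∀ c' ∈ cells, pvInb g0 c' := fun c' hc' => hcells c' (List.mem_cons_of_mem _ hc')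
    simp only [List.foldl_cons]
    have hany : pvDirsB.any (pvNbr2 (pvH g0) (pvW g0) G c.1 c.2) =
        pvDirsB.any (pvNbrV (pvH g0) (pvW g0) V c) := by
      refine List.any_congr rfl ?_
      intro d
      unfold pvNbr2 pvNbrV
      by_cases hg : 0 ≤ (c.1 : Int) + d.1 ∧ (c.1 : Int) + d.1 < (pvH g0 : Int) ∧
          0 ≤ (c.2 : Int) + d.2 ∧ (c.2 : Int) + d.2 < (pvW g0 : Int)
      · have hninb : pvInb g0 (((c.1 : Int) + d.1).toNat, ((c.2 : Int) + d.2).toNat) := by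
          unfold pvInb
          dsimp only
          constructor <;> omega
        simp only [decide_eq_true hg, Bool.true_and]
        set n : Nat × Nat := (((c.1 : Int) + d.1).toNat, ((c.2 : Int) + d.2).toNat) with hn
        rw [hR.2.2 n hninb]
        by_cases hv : n ∈ V
        · rw [if_pos hv]
          simp [hv]
        · rw [if_neg hv]
          have hval2 : pvVal g0 n ≠ 2 := fun h2 => hv (hI (pvMem_init.mpr ⟨hninb, h2⟩))
          simp [hv, hval2]
      · simp only [decide_eq_false hg, Bool.false_and]
    have hcond : (pvGet2 G c.1 c.2 = 0 ∧ pvDirsB.any (pvNbr2 (pvH g0) (pvW g0) G c.1 c.2)) ↔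
        ((c ∉ V ∧ pvVal g0 c = 0) ∧ pvDirsB.any (pvNbrV (pvH g0) (pvW g0) V c)) := by
      rw [hany, hR.2.2 c hinb]
      by_cases hv : c ∈ V
      · rw [if_pos hv]
        constructor
        · intro hh; exact absurd hh.1 (by norm_num)
        · intro hh; exact absurd hv hh.1.1
      · rw [if_neg hv]
        constructor
        · intro hh; exact ⟨⟨hv, hh.1⟩, hh.2⟩
        · intro hh; exact ⟨hh.1.2, hh.2⟩
    by_cases hc : (c ∉ V ∧ pvVal g0 c = 0) ∧ pvDirsB.any (pvNbrV (pvH g0) (pvW g0) V c)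
    · rw [show pvSweepStep (pvH g0) (pvW g0) (G, b) c = (pvSet2 G c.1 c.2 2, true) from
        if_pos (hcond.mpr hc)]
      rw [show pvStepB g0 (pvH g0) (pvW g0) (V, b) c = (insert c V, true) from if_pos hc]
      exact ih _ _ _ hcells' (pvRep_insert hp hR hinb) (fun m hm => Finset.mem_insert_of_mem (hI hm))
    · rw [show pvSweepStep (pvH g0) (pvW g0) (G, b) c = (G, b) from
        if_neg (fun hh => hc (hcond.mp hh))]
      rw [show pvStepB g0 (pvH g0) (pvW g0) (V, b) c = (V, b) from if_neg hc]
      exact ih G V b hcells' hR hI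

theorem pvStepB_cases (g0 : List (List Int)) (h w : Nat)
    (st : Finset (Nat × Nat) × Bool) (c : Nat × Nat) :
    (¬ ((c ∉ st.1 ∧ pvVal g0 c = 0) ∧ pvDirsB.any (pvNbrV h w st.1 c) = true) ∧
      pvStepB g0 h w st c = st) ∨
    (((c ∉ st.1 ∧ pvVal g0 c = 0) ∧ pvDirsB.any (pvNbrV h w st.1 c) = true) ∧
      pvStepB g0 h w st c = (insert c st.1, true)) := by
  by_cases hc : (c ∉ st.1 ∧ pvVal g0 c = 0) ∧ pvDirsB.any (pvNbrV h w st.1 c) = true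
  · exact Or.inr ⟨hc, by unfold pvStepB; rw [if_pos hc]⟩
  · exact Or.inl ⟨hc, by unfold pvStepB; rw [if_neg hc]⟩

theorem pvFoldB_mono (g0 : List (List Int)) (h w : Nat) :
    ∀ (cells : List (Nat × Nat)) (st : Finset (Nat × Nat) × Bool),
      st.1 ⊆ (cells.foldl (pvStepB g0 h w) st).1 := by
  intro cells
  induction cells with
  | nil => exact fun st => fun _ hm => hm
  | cons c cells ih =>
    intro st
    simp only [List.foldl_cons]
    rcases pvStepB_cases g0 h w st c with ⟨-, heq⟩ | ⟨-, heq⟩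
    · rw [heq]; exact ih st
    · rw [heq]
      exact fun m hm => ih _ (Finset.mem_insert_of_mem hm)

theorem pvFoldB_flag (g0 : List (List Int)) (h w : Nat) :
    ∀ (cells : List (Nat × Nat)) (st : Finset (Nat × Nat) × Bool),
      st.2 = true → (cells.foldl (pvStepB g0 h w) st).2 = true := by
  intro cells
  induction cells with
  | nil => exact fun st hb => hb
  | cons c cells ih =>
    intro st hb
    simp only [List.foldl_cons]
    rcases pvStepB_cases g0 h w st c with ⟨-, heq⟩ | ⟨-, heq⟩
    · rw [heq]; exact ih st hb
    · rw [heq]; exact ih _ rfl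

theorem pvFoldB_unchanged (g0 : List (List Int)) (h w : Nat) :
    ∀ (cells : List (Nat × Nat)) (st : Finset (Nat × Nat) × Bool),
      (cells.foldl (pvStepB g0 h w) st).2 = false →
      cells.foldl (pvStepB g0 h w) st = st := by
  intro cells
  induction cells with
  | nil => exact fun st _ => rfl
  | cons c cells ih =>
    intro st hf
    simp only [List.foldl_cons] at hf ⊢
    rcases pvStepB_cases g0 h w st c with ⟨-, heq⟩ | ⟨-, heq⟩
    · rw [heq] at hf ⊢; exact ih st hf
    · rw [heq] at hf
      have := pvFoldB_flag g0 h w cells (insert c st.1, true) rfl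
      rw [this] at hf
      exact Bool.noConfusion hf

theorem pvFoldB_fix (g0 : List (List Int)) (h w : Nat) :
    ∀ (cells : List (Nat × Nat)) (st : Finset (Nat × Nat) × Bool),
      (cells.foldl (pvStepB g0 h w) st).1 = st.1 →
      ∀ c ∈ cells, ¬ ((c ∉ st.1 ∧ pvVal g0 c = 0) ∧ pvDirsB.any (pvNbrV h w st.1 c) = true) := by
  intro cells
  induction cells with
  | nil => exact fun st _ c hc => absurd hc (List.not_mem_nil)
  | cons c0 cells ih =>
    intro st hfix c hc
    simp only [List.foldl_cons] at hfix
    rcases pvStepB_cases g0 h w st c0 with ⟨hnc, heq⟩ | ⟨hcc, heq⟩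
    · rw [heq] at hfix
      rcases List.mem_cons.mp hc with rfl | hc'
      · exact hnc
      · exact ih st hfix c hc'
    · rw [heq] at hfix
      exfalso
      have hsub := pvFoldB_mono g0 h w cells (insert c0 st.1, true)
      rw [hfix] at hsub
      exact hcc.1.1 (hsub (Finset.mem_insert_self _ _))

theorem pvFoldB_progress (g0 : List (List Int)) (h w : Nat) :
    ∀ (cells : List (Nat × Nat)) (st : Finset (Nat × Nat) × Bool),
      (cells.foldl (pvStepB g0 h w) st).2 = true →
      st.2 = true ∨ ∃ c, c ∉ st.1 ∧ c ∈ (cells.foldl (pvStepB g0 h w) st).1 := by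
  intro cells
  induction cells with
  | nil => exact fun st hb => Or.inl hb
  | cons c0 cells ih =>
    intro st hb
    simp only [List.foldl_cons] at hb ⊢
    rcases pvStepB_cases g0 h w st c0 with ⟨-, heq⟩ | ⟨hcc, heq⟩
    · rw [heq] at hb ⊢; exact ih st hb
    · rw [heq]
      refine Or.inr ⟨c0, hcc.1.1, ?_⟩
      exact pvFoldB_mono g0 h w cells _ (Finset.mem_insert_self _ _)

theorem pvFoldB_min (g0 : List (List Int)) :
    ∀ (cells : List (Nat × Nat)) (st : Finset (Nat × Nat) × Bool) (W : Finset (Nat × Nat)),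
      pvClosed g0 W → (∀ c ∈ cells, pvInb g0 c) → st.1 ⊆ W →
      (cells.foldl (pvStepB g0 (pvH g0) (pvW g0)) st).1 ⊆ W := by
  intro cells
  induction cells with
  | nil => exact fun st W _ _ hsub => hsub
  | cons c cells ih =>
    intro st W hW hcells hsub
    simp only [List.foldl_cons]
    rcases pvStepB_cases g0 (pvH g0) (pvW g0) st c with ⟨-, heq⟩ | ⟨hcc, heq⟩
    · rw [heq]
      exact ih st W hW (fun c' hc' => hcells c' (List.mem_cons_of_mem _ hc')) hsub
    · rw [heq]
      obtain ⟨⟨-, hval⟩, hany⟩ := hcc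
      obtain ⟨d, hd, hnv⟩ := List.any_eq_true.mp hany
      obtain ⟨n, hnV, hninb, hadj⟩ := pvNbrV_adj hd hnv
      have hcW : c ∈ W :=
        hW n c (hsub hnV) (hcells c (List.mem_cons_self)) hval (pvAdj_symm hadj)
      exact ih _ W hW (fun c' hc' => hcells c' (List.mem_cons_of_mem _ hc'))
        (Finset.insert_subset hcW hsub)

theorem pvFoldB_region (g0 : List (List Int)) (h w : Nat) :
    ∀ (cells : List (Nat × Nat)) (st : Finset (Nat × Nat) × Bool),
      (∀ m ∈ st.1, pvInb g0 m) → (∀ c ∈ cells, pvInb g0 c) →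
      ∀ m ∈ (cells.foldl (pvStepB g0 h w) st).1, pvInb g0 m := by
  intro cells
  induction cells with
  | nil => exact fun st hreg _ => hreg
  | cons c cells ih =>
    intro st hreg hcells
    simp only [List.foldl_cons]
    rcases pvStepB_cases g0 h w st c with ⟨-, heq⟩ | ⟨-, heq⟩
    · rw [heq]; exact ih st hreg (fun c' hc' => hcells c' (List.mem_cons_of_mem _ hc'))
    · rw [heq]
      refine ih _ ?_ (fun c' hc' => hcells c' (List.mem_cons_of_mem _ hc'))
      intro m hm
      rcases Finset.mem_insert.mp hm with rfl | hm'
      · exact hcells m (List.mem_cons_self)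
      · exact hreg m hm'

-- a fixed sweep state is closed
theorem pvSweepB_closed (g0 : List (List Int)) {V : Finset (Nat × Nat)}
    (hreg : ∀ m ∈ V, pvInb g0 m)
    (hfix : ((pvCells (pvH g0) (pvW g0)).foldl (pvStepB g0 (pvH g0) (pvW g0)) (V, false)).1 = V) :
    pvClosed g0 V := by
  intro a n ha hn hval hadj
  by_contra hnV
  have hcell : n ∈ pvCells (pvH g0) (pvW g0) := pvMem_cells.mpr ⟨hn.1, hn.2⟩
  have := pvFoldB_fix g0 (pvH g0) (pvW g0) (pvCells (pvH g0) (pvW g0)) (V, false) hfix n hcell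
  exact this ⟨⟨hnV, hval⟩, pvAdj_dirB (hreg a ha) ha (pvAdj_symm hadj)⟩

def pvLoopB (g0 : List (List Int)) (h w : Nat) : Nat → Finset (Nat × Nat) → Finset (Nat × Nat)
  | 0, V => V
  | fuel + 1, V =>
    let st := (pvCells h w).foldl (pvStepB g0 h w) (V, false)
    if st.2 then pvLoopB g0 h w fuel st.1 else st.1

theorem pvAltLoop_sim (g0 : List (List Int)) (hp : Pre_bfs g0) :
    ∀ (fuel : Nat) (G : List (List Int)) (V : Finset (Nat × Nat)),
      pvRep g0 G V → pvInit g0 ⊆ V →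
      pvRep g0 (pvAltLoop (pvH g0) (pvW g0) fuel G) (pvLoopB g0 (pvH g0) (pvW g0) fuel V) := by
  intro fuel
  induction fuel with
  | zero => exact fun G V hR _ => hR
  | succ fuel ih =>
    intro G V hR hI
    rw [pvAltLoop, pvLoopB]
    rw [pvSweep_eq]
    have hcells : ∀ c ∈ pvCells (pvH g0) (pvW g0), pvInb g0 c := fun c hc => pvMem_cells.mp hc
    obtain ⟨h1, h2, h3⟩ := pvSweep_sim g0 hp (pvCells (pvH g0) (pvW g0)) G V false hcells hR hI
    rw [h2]
    by_cases hflag : ((pvCells (pvH g0) (pvW g0)).foldl (pvStepB g0 (pvH g0) (pvW g0)) (V, false)).2 = true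
    · rw [if_pos hflag, if_pos hflag]
      exact ih _ _ h1 h3
    · rw [if_neg hflag, if_neg hflag]
      exact h1

theorem pvLoopB_main (g0 : List (List Int)) :
    ∀ (fuel : Nat) (V : Finset (Nat × Nat)),
      pvInit g0 ⊆ V → (∀ m ∈ V, pvInb g0 m) →
      (pvH g0 * pvW g0 + 1 ≤ fuel + V.card) →
      V ⊆ pvLoopB g0 (pvH g0) (pvW g0) fuel V ∧
      pvClosed g0 (pvLoopB g0 (pvH g0) (pvW g0) fuel V) ∧
      (∀ W, pvClosed g0 W → V ⊆ W → pvLoopB g0 (pvH g0) (pvW g0) fuel V ⊆ W) := by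
  intro fuel
  induction fuel with
  | zero =>
    intro V _ hreg hfuel
    exact absurd (pvCard_le g0 hreg) (by omega)
  | succ fuel ih =>
    intro V hI hreg hfuel
    rw [pvLoopB]
    have hcells : ∀ c ∈ pvCells (pvH g0) (pvW g0), pvInb g0 c := fun c hc => pvMem_cells.mp hc
    set st := (pvCells (pvH g0) (pvW g0)).foldl (pvStepB g0 (pvH g0) (pvW g0)) (V, false) with hst
    have hmono : V ⊆ st.1 := pvFoldB_mono g0 (pvH g0) (pvW g0) _ (V, false)
    have hreg' : ∀ m ∈ st.1, pvInb g0 m :=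
      pvFoldB_region g0 (pvH g0) (pvW g0) _ (V, false) hreg hcells
    by_cases hflag : st.2 = true
    · rw [if_pos hflag]
      rcases pvFoldB_progress g0 (pvH g0) (pvW g0) _ (V, false) hflag with hb | ⟨c, hcV, hcst⟩
      · exact Bool.noConfusion hb
      · have hcard : V.card + 1 ≤ st.1.card :=
          Finset.card_lt_card (Finset.ssubset_iff_of_subset hmono |>.mpr ⟨c, hcst, hcV⟩)
        have hI' : pvInit g0 ⊆ st.1 := fun m hm => hmono (hI hm)
        obtain ⟨qa, qb, qc⟩ := ih st.1 hI' hreg' (by omega)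
        refine ⟨fun m hm => qa (hmono hm), qb, ?_⟩
        intro W hW hsub
        exact qc W hW (pvFoldB_min g0 _ (V, false) W hW hcells hsub)
    · rw [if_neg hflag]
      have hfb : st.2 = false := Bool.eq_false_iff.mpr hflag
      have hfixall := pvFoldB_unchanged g0 (pvH g0) (pvW g0) _ (V, false) hfb
      have hfix : st.1 = V := congrArg Prod.fst hfixall
      rw [hfix]
      exact ⟨fun _ h => h, pvSweepB_closed g0 hreg (hst ▸ hfix), fun W _ hsub => hsub⟩

-- ---------- counting ----------
theorem pvFoldl_congr {α β : Type} :
    ∀ (l : List α) (f g : β → α → β) (i : β),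
      (∀ b : β, ∀ a ∈ l, f b a = g b a) → l.foldl f i = l.foldl g i := by
  intro l
  induction l with
  | nil => intro f g i _; rfl
  | cons a l ih =>
    intro f g i h
    simp only [List.foldl_cons]
    rw [h i a (List.mem_cons_self)]
    exact ih f g _ (fun b a' ha' => h b a' (List.mem_cons_of_mem _ ha'))

def pvCountAbs (g0 : List (List Int)) (V : Finset (Nat × Nat)) : Int :=
  (List.range (pvH g0)).foldl (fun cnt i =>
    (List.range (pvW g0)).foldl (fun cnt j =>
      if (if ((i, j) : Nat × Nat) ∈ V then (2 : Int) else pvVal g0 (i, j)) = 0 then cnt + 1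
      else cnt) cnt) 0

theorem pvCountSafety_eq {g0 G : List (List Int)} {V : Finset (Nat × Nat)}
    (hR : pvRep g0 G V) : pvCountSafety G = pvCountAbs g0 V := by
  unfold pvCountSafety pvCountAbs
  have hlen : G.length = pvH g0 := hR.1
  have hw : (G.headD []).length = pvW g0 := by
    unfold pvW
    rw [List.headD_eq_head?_getD, List.head?_eq_getElem?, ← List.getD_eq_getElem?_getD,
      List.headD_eq_head?_getD, List.head?_eq_getElem?, ← List.getD_eq_getElem?_getD]
    exact hR.2.1 0
  rw [hlen, hw]
  refine pvFoldl_congr _ _ _ _ ?_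
  intro b i hi
  refine pvFoldl_congr _ _ _ _ ?_
  intro b' j hj
  rw [show pvGet2 G i j = pvGet2 G ((i, j) : Nat × Nat).1 ((i, j) : Nat × Nat).2 from rfl]
  rw [hR.2.2 (i, j) ⟨List.mem_range.mp hi, List.mem_range.mp hj⟩]

theorem pvCountB_eq {g0 G : List (List Int)} {V : Finset (Nat × Nat)}
    (hR : pvRep g0 G V) : pvCountB (pvH g0) (pvW g0) G = pvCountAbs g0 V := by
  unfold pvCountB pvCountAbs
  refine pvFoldl_congr _ _ _ _ ?_
  intro b i hi
  refine pvFoldl_congr _ _ _ _ ?_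
  intro b' j hj
  rw [show pvGet2 G i j = pvGet2 G ((i, j) : Nat × Nat).1 ((i, j) : Nat × Nat).2 from rfl]
  rw [hR.2.2 (i, j) ⟨List.mem_range.mp hi, List.mem_range.mp hj⟩]

-- ---------- final assembly ----------
theorem pvBfs_eq (g0 : List (List Int)) (hp : Pre_bfs g0) : bfs g0 = bfs_alt g0 := by
  have hcellsInb : ∀ c ∈ pvCells (pvH g0) (pvW g0), pvInb g0 c := fun c hc => pvMem_cells.mp hc
  set QN : List (Nat × Nat) := (pvCells (pvH g0) (pvW g0)).filter (fun c => pvVal g0 c = 2)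
    with hQN
  have hq : (pvBfsInit g0 (pvH g0) (pvW g0)).2 = QN.map pvCast := by
    rw [pvBfsInit_eq, pvInitFold_queue]
    simp [hQN]
  have hvis : pvVisOk (pvBfsInit g0 (pvH g0) (pvW g0)).1 (pvInit g0) := by
    rw [pvBfsInit_eq]
    refine pvInitFold_vis g0 _ _ hcellsInb ?_
    intro m _
    exact pvBGet2_replicate _ _ _ _
  have hQV : ∀ m ∈ QN, m ∈ pvInit g0 := by
    intro m hm
    rw [hQN, List.mem_filter] at hm
    exact pvMem_init.mpr ⟨pvMem_cells.mp hm.1, by simpa using hm.2⟩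
  have hQV' : ∀ m ∈ pvInit g0, m ∈ QN := by
    intro m hm
    rw [hQN, List.mem_filter]
    exact ⟨pvMem_cells.mpr (pvMem_init.mp hm).1, by simp [(pvMem_init.mp hm).2]⟩
  have hregI : ∀ m ∈ pvInit g0, pvInb g0 m := fun m hm => (pvMem_init.mp hm).1
  set fuelA := pvH g0 * pvW g0 + (QN.map pvCast).length with hfA
  have hRA := pvLoop_sim g0 hp fuelA g0 (pvBfsInit g0 (pvH g0) (pvW g0)).1
    (pvInit g0) QN (pvRep_start g0) hvis
  have hmainA := pvLoopA_main g0 hp fuelA (pvInit g0) QN hQV hregI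
    (by rw [hfA, List.length_map]; omega)
    (fun c hc hnq => absurd (hQV' c hc) hnq)
  have hRB := pvAltLoop_sim g0 hp (pvH g0 * pvW g0 + 1) g0 (pvInit g0)
    (pvRep_start g0) (fun _ h => h)
  have hmainB := pvLoopB_main g0 (pvH g0 * pvW g0 + 1) (pvInit g0) (fun _ h => h) hregI
    (by omega)
  obtain ⟨aSub, aReg, aCl, aMin⟩ := hmainA
  obtain ⟨bSub, bCl, bMin⟩ := hmainB
  have hVAB : pvLoopA g0 (pvH g0) (pvW g0) fuelA (pvInit g0) QN =
      pvLoopB g0 (pvH g0) (pvW g0) (pvH g0 * pvW g0 + 1) (pvInit g0) :=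
    Finset.Subset.antisymm (aMin _ bCl bSub) (bMin _ aCl aSub)
  show pvCountSafety (pvBfsLoop (pvH g0) (pvW g0)
      (pvH g0 * pvW g0 + (pvBfsInit g0 (pvH g0) (pvW g0)).2.length) g0
      (pvBfsInit g0 (pvH g0) (pvW g0)).1 (pvBfsInit g0 (pvH g0) (pvW g0)).2) =
    pvCountB (pvH g0) (pvW g0) (pvAltLoop (pvH g0) (pvW g0) (pvH g0 * pvW g0 + 1) g0)
  rw [hq]
  rw [pvCountSafety_eq hRA, pvCountB_eq hRB, hVAB]

-- ===== VERDICT (by name: the statement is the Claim_ definition above) =====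
theorem bfs_spec : Claim_equal_bfs := by
  intro COPY_MAP _ hpre
  unfold Spec_bfs
  exact pvBfs_eq COPY_MAP hpre
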